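-- pv_equiv track=rewrite | github.com/atharvavdeo/agent-mem | src/agent_mem/mcp_server.py | _scored_excerpt
-- ===== SOURCE A (Python) =====
-- def _score_line(line: str, query: str) -> int:
--     line_lower = line.lower()
--     query_lower = query.lower().strip()
--     if not query_lower:
--         return 0
--
--     score = 0
--     for word in query_lower.split():
--         if word and word in line_lower:
--             score += 2
--     if query_lower in line_lower:
--         score += 5
--     return score
--
-- def _scored_excerpt(content: str, query: str, limit: int = 12) -> list[str]:
--     lines = [line.strip() for line in content.splitlines() if line.strip()]
--     scored = sorted(
--         ((line, _score_line(line, query)) for line in lines),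
--         key=lambda item: item[1],
--         reverse=True,
--     )
--     matches = [line for line, score in scored if score > 0][:limit]
--     if matches:
--         return matches
--     return [content[:800].strip()] if content.strip() else []
-- ===== SOURCE B (Python) =====
-- def _score_line(line: str, query: str) -> int:
--     line_lower = line.lower()
--     query_lower = query.lower().strip()
--     if not query_lower:
--         return 0
--
--     score = 0
--     for word in query_lower.split():
--         if word and word in line_lower:
--             score += 2
--     if query_lower in line_lower:
--         score += 5
--     return score
--
-- def _scored_excerpt(content: str, query: str, limit: int = 12) -> list[str]:
--     # One scan: bucket the non-empty stripped lines by positive score, keeping scan order.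
--     buckets = {}
--     best = 0
--     for raw in content.splitlines():
--         line = raw.strip()
--         if not line:
--             continue
--         s = _score_line(line, query)
--         if s > 0:
--             buckets.setdefault(s, []).append(line)
--             if s > best:
--                 best = s
--     result = []
--     for s in range(best, 0, -1):
--         result.extend(buckets.get(s, []))
--     matches = result[:limit]
--     if matches:
--         return matches
--     return [content[:800].strip()] if content.strip() else []
-- ===== Notes on version B (the rewrite author's own statement) =====
-- stated objective: alternative
-- what changed: B replaces A's sort of all scored lines by a single scan that appends each positively-scoring stripped line into a dict bucket keyed by its score, then reads the buckets out from the best score down to 1, which reproduces the stable descending sort restricted to positive scores.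
import Mathlib
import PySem

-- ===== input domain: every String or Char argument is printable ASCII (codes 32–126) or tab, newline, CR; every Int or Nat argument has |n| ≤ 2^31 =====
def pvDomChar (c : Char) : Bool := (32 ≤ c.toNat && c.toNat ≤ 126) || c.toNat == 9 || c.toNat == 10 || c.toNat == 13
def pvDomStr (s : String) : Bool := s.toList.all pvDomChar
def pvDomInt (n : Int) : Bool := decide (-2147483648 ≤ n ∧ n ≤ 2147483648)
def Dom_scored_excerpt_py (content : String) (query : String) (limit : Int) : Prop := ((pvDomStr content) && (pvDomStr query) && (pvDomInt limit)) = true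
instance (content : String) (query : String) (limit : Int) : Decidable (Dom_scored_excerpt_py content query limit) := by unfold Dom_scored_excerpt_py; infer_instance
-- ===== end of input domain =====

-- B replaces sort-then-filter by one scan into per-score buckets read out from the best
-- score down (objective: alternative single-pass decomposition, no sort).

-- ===== PORT A =====
-- _score_line (identical helper in both Pythons; shared by both ports)
def pvScoreLine (line : String) (query : String) : Int :=
  let line_lower := PySem.Str.lower line
  let query_lower := PySem.Str.strip (PySem.Str.lower query)
  if PySem.Str.len query_lower = 0 then 0
  else
    let score := (PySem.Str.split₀ query_lower).foldl
      (fun score word =>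
        if PySem.Str.len word ≠ 0 ∧ PySem.Str.isIn word line_lower = true then score + 2 else score) 0
    if PySem.Str.isIn query_lower line_lower = true then score + 5 else score

def scored_excerpt_py (content : String) (query : String) (limit : Int) : List String :=
  let lines := ((PySem.Str.splitlines content).map PySem.Str.strip).filter
    (fun l => decide (PySem.Str.len l ≠ 0))
  let scored := PySem.List.sorted (lines.map (fun line => (line, pvScoreLine line query)))
    (fun item => item.2) true
  let matches_ := PySem.List.slice ((scored.filter (fun p => decide (0 < p.2))).map (fun p => p.1))
    none (some limit)
  if matches_ ≠ [] then matches_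
  else if PySem.Str.len (PySem.Str.strip content) ≠ 0 then
    [PySem.Str.strip (PySem.Str.slice content none (some 800))]
  else []

-- ===== PORT B =====
def scored_excerpt_py_alt (content : String) (query : String) (limit : Int) : List String :=
  let st := (PySem.Str.splitlines content).foldl
    (fun (st : PySem.Dict Int (List String) × Int) raw =>
      let line := PySem.Str.strip raw
      if PySem.Str.len line = 0 then st
      else
        let s := pvScoreLine line query
        if 0 < s then
          (st.1.insert s (st.1.getD s [] ++ [line]), if st.2 < s then s else st.2)
        else st)
    (PySem.Dict.empty, 0)
  let result := (PySem.List.pyRange st.2 0 (-1)).foldl (fun acc s => acc ++ st.1.getD s []) []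
  let matches_ := PySem.List.slice result none (some limit)
  if matches_ ≠ [] then matches_
  else if PySem.Str.len (PySem.Str.strip content) ≠ 0 then
    [PySem.Str.strip (PySem.Str.slice content none (some 800))]
  else []

-- ===== PRECONDITION & SPEC =====
def Spec_scored_excerpt_py (content : String) (query : String) (limit : Int) (out : List String) : Prop := out = scored_excerpt_py_alt content query limit
instance (content : String) (query : String) (limit : Int) (out : List String) : Decidable (Spec_scored_excerpt_py content query limit out) := by unfold Spec_scored_excerpt_py; infer_instance

-- ===== CLAIM (what is proved, stated in full; the proofs are below) =====
def Claim_equal_scored_excerpt_py : Prop := ∀ (content : String) (query : String) (limit : Int), Dom_scored_excerpt_py content query limit → Spec_scored_excerpt_py content query limit (scored_excerpt_py content query limit)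

-- ===== LEMMAS AND PROOFS =====

-- abbreviated pieces used by the proofs
def pvLines (content : String) : List String :=
  ((PySem.Str.splitlines content).map PySem.Str.strip).filter (fun l => decide (PySem.Str.len l ≠ 0))

def pvStep (query : String) (st : PySem.Dict Int (List String) × Int) (line : String) :
    PySem.Dict Int (List String) × Int :=
  let s := pvScoreLine line query
  if 0 < s then (st.1.insert s (st.1.getD s [] ++ [line]), if st.2 < s then s else st.2) else st

-- B's outer fold over raw splitlines equals a fold of pvStep over the stripped non-empty lines
theorem pv_fold_skip (query : String) (xs : List String)
    (st : PySem.Dict Int (List String) × Int) :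
    xs.foldl (fun st raw =>
      let line := PySem.Str.strip raw
      if PySem.Str.len line = 0 then st
      else
        let s := pvScoreLine line query
        if 0 < s then (st.1.insert s (st.1.getD s [] ++ [line]), if st.2 < s then s else st.2)
        else st) st
    = ((xs.map PySem.Str.strip).filter (fun l => decide (PySem.Str.len l ≠ 0))).foldl
        (pvStep query) st := by
  induction xs generalizing st with
  | nil => simp only [List.foldl_nil, List.map_nil, List.filter_nil]
  | cons x t ih =>
    rw [List.foldl_cons]
    simp only []
    rw [ih, List.map_cons, List.filter_cons]
    by_cases h : PySem.Str.len (PySem.Str.strip x) = 0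
    · have h' : PySem.Chars.strip x.toList = [] := by simpa using h
      have hc : (decide (PySem.Str.len (PySem.Str.strip x) ≠ 0)) = false := by simp [h']
      rw [if_pos h, hc]
      simp only [Bool.false_eq_true, if_false]
    · have h' : ¬ PySem.Chars.strip x.toList = [] := by simpa using h
      have hc : (decide (PySem.Str.len (PySem.Str.strip x) ≠ 0)) = true := by simp [h']
      rw [if_neg h, hc]
      simp only [if_true, List.foldl_cons]
      congr 1

-- bucket invariant: each positive bucket collects exactly the lines of that score, in order
theorem pv_bucket (query : String) (ls : List String)
    (st : PySem.Dict Int (List String) × Int) (s : Int) (hs : 0 < s) :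
    ((ls.foldl (pvStep query) st).1).getD s []
      = st.1.getD s [] ++ ls.filter (fun l => decide (pvScoreLine l query = s)) := by
  induction ls generalizing st with
  | nil => simp
  | cons x t ih =>
    simp only [List.foldl_cons, List.filter_cons]
    by_cases hp : 0 < pvScoreLine x query
    · by_cases he : pvScoreLine x query = s
      · rw [ih]
        simp [pvStep, hs, he]
      · rw [ih]
        simp [pvStep, hp, PySem.Dict.getD_insert, he, Ne.symm he]
    · have he : pvScoreLine x query ≠ s := by omega
      rw [ih]
      simp [pvStep, hp, he]

-- best is an upper bound for every positive score seen, and never decreases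
theorem pv_best_mono (query : String) (ls : List String)
    (st : PySem.Dict Int (List String) × Int) :
    st.2 ≤ (ls.foldl (pvStep query) st).2 := by
  induction ls generalizing st with
  | nil => simp
  | cons x t ih =>
    simp only [List.foldl_cons]
    refine le_trans ?_ (ih _)
    simp only [pvStep]
    split_ifs <;> simp <;> omega

theorem pv_best_bound (query : String) (ls : List String)
    (st : PySem.Dict Int (List String) × Int) (l : String) (hl : l ∈ ls)
    (hp : 0 < pvScoreLine l query) :
    pvScoreLine l query ≤ (ls.foldl (pvStep query) st).2 := by
  induction ls generalizing st with
  | nil => cases hl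
  | cons x t ih =>
    simp only [List.foldl_cons]
    rcases List.mem_cons.mp hl with h | h
    · subst h
      refine le_trans ?_ (pv_best_mono query t _)
      simp only [pvStep, hp, if_pos]
      split_ifs <;> omega
    · exact ih _ h

-- descending score list
theorem pv_pyRange_desc (b : Int) (hb : 0 ≤ b) :
    PySem.List.pyRange b 0 (-1) = (List.range b.toNat).map (fun k : Nat => b - (k : Int)) := by
  simp only [PySem.List.pyRange]
  norm_num
  rcases lt_or_ge 0 b with h | h
  · rw [if_pos h]
    simp [sub_eq_add_neg, ← List.map_eq_flatMap]
  · have : b = 0 := le_antisymm h hb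
    subst this; simp

theorem pv_mem_desc (b v : Int) (hv : v ∈ (List.range b.toNat).map (fun k : Nat => b - (k : Int))) :
    1 ≤ v ∧ v ≤ b := by
  obtain ⟨k, hk, rfl⟩ := List.mem_map.mp hv
  rw [List.mem_range] at hk
  omega

-- stability of PySem's insertion sort: filtering one key value commutes with sorting
theorem pv_filter_insertBy (v : Int) (x : String × Int) (ys : List (String × Int))
    (hys : ys.Pairwise (fun a b => b.2 ≤ a.2)) :
    (PySem.List.insertBy (fun a b => decide (b.2 < a.2)) x ys).filter (fun p => decide (p.2 = v))
      = ys.filter (fun p => decide (p.2 = v)) ++ (if x.2 = v then [x] else []) := by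
  induction ys with
  | nil =>
    rw [show PySem.List.insertBy (fun a b => decide (b.2 < a.2)) x [] = [x] from rfl]
    rw [List.filter_cons]
    by_cases hx : x.2 = v <;> simp [hx]
  | cons y t ih =>
    rw [List.pairwise_cons] at hys
    by_cases hlt : y.2 < x.2
    · rw [show PySem.List.insertBy (fun a b => decide (b.2 < a.2)) x (y :: t) = x :: y :: t from by
        simp [PySem.List.insertBy, hlt]]
      by_cases hx : x.2 = v
      · have hty : ((y :: t).filter (fun p => decide (p.2 = v))) = [] := by
          apply List.filter_eq_nil_iff.mpr
          intro p hp
          rcases List.mem_cons.mp hp with h | h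
          · subst h; simp; omega
          · have := hys.1 p h; simp; omega
        rw [List.filter_cons, hty]
        simp [hx]
      · rw [List.filter_cons]
        simp [hx]
    · rw [show PySem.List.insertBy (fun a b => decide (b.2 < a.2)) x (y :: t)
          = y :: PySem.List.insertBy (fun a b => decide (b.2 < a.2)) x t from by
        simp [PySem.List.insertBy, hlt]]
      rw [List.filter_cons, List.filter_cons, ih hys.2]
      by_cases hy : y.2 = v <;> simp [hy]

theorem pv_pairwise_insertBy (x : String × Int) (ys : List (String × Int))
    (hys : ys.Pairwise (fun a b => b.2 ≤ a.2)) :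
    (PySem.List.insertBy (fun a b => decide (b.2 < a.2)) x ys).Pairwise
      (fun a b => b.2 ≤ a.2) := by
  induction ys with
  | nil => simp [PySem.List.insertBy]
  | cons y t ih =>
    rw [List.pairwise_cons] at hys
    by_cases hlt : y.2 < x.2
    · simp only [PySem.List.insertBy, hlt, decide_true, if_pos]
      rw [List.pairwise_cons]
      constructor
      · intro z hz
        rcases List.mem_cons.mp hz with h | h
        · subst h; omega
        · have := hys.1 z h; omega
      · exact List.pairwise_cons.mpr hys
    · simp only [PySem.List.insertBy, hlt, decide_false, if_neg, Bool.false_eq_true,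
        not_false_iff]
      rw [List.pairwise_cons]
      refine ⟨?_, ih hys.2⟩
      intro z hz
      rcases (PySem.List.mem_insertBy _ x z t).mp hz with h | h
      · subst h; omega
      · exact hys.1 z h

theorem pv_sorted_stable (v : Int) (ps : List (String × Int)) :
    (PySem.List.sorted ps (fun p => p.2) true).filter (fun p => decide (p.2 = v))
      = ps.filter (fun p => decide (p.2 = v)) := by
  rw [PySem.List.sorted_rev_eq_foldl_insertBy]
  suffices h : ∀ (acc : List (String × Int)), acc.Pairwise (fun a b => b.2 ≤ a.2) →
      (ps.foldl (fun acc x => PySem.List.insertBy (fun a b => decide (b.2 < a.2)) x acc) acc).filter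
        (fun p => decide (p.2 = v))
      = acc.filter (fun p => decide (p.2 = v)) ++ ps.filter (fun p => decide (p.2 = v)) by
    simpa using h [] (by simp)
  induction ps with
  | nil => intro acc _; simp
  | cons x t ih =>
    intro acc hacc
    simp only [List.foldl_cons, List.filter_cons]
    rw [ih _ (pv_pairwise_insertBy x acc hacc), pv_filter_insertBy v x acc hacc]
    by_cases hx : x.2 = v <;> simp [hx]

-- a desc-pairwise list whose keys all lie in a strictly descending value list splits into buckets
theorem pv_split_top (v : Int) (l : List (String × Int))
    (hl : l.Pairwise (fun a b => b.2 ≤ a.2)) (hb : ∀ p ∈ l, p.2 ≤ v) :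
    l = l.filter (fun p => decide (p.2 = v)) ++ l.filter (fun p => !decide (p.2 = v)) := by
  induction l with
  | nil => simp
  | cons p t ih =>
    rw [List.pairwise_cons] at hl
    by_cases hp : p.2 = v
    · simp only [List.filter_cons, hp, decide_true, Bool.not_true, Bool.false_eq_true, if_false,
        if_true, List.cons_append]
      exact congrArg _ (ih hl.2 (fun q hq => hb q (List.mem_cons_of_mem _ hq)))
    · have hpv : p.2 < v := lt_of_le_of_ne (hb p (List.mem_cons_self)) hp
      have ht1 : t.filter (fun q => decide (q.2 = v)) = [] := by
        apply List.filter_eq_nil_iff.mpr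
        intro q hq
        have := hl.1 q hq; simp; omega
      have ht2 : t.filter (fun q => !decide (q.2 = v)) = t := by
        apply List.filter_eq_self.mpr
        intro q hq
        have := hl.1 q hq; simp; omega
      simp [hp, ht1, ht2]

theorem pv_bucket_decomp (vs : List Int) (l : List (String × Int))
    (hl : l.Pairwise (fun a b => b.2 ≤ a.2)) (hvs : vs.Pairwise (fun a b => b < a))
    (hmem : ∀ p ∈ l, p.2 ∈ vs) :
    l = vs.flatMap (fun v => l.filter (fun p => decide (p.2 = v))) := by
  induction vs generalizing l with
  | nil =>
    have : l = [] := by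
      cases l with
      | nil => rfl
      | cons p t => exact absurd (hmem p List.mem_cons_self) (by simp)
    simp [this]
  | cons v vs' ih =>
    rw [List.flatMap_cons]
    have hb : ∀ p ∈ l, p.2 ≤ v := by
      intro p hp
      rcases List.mem_cons.mp (hmem p hp) with h | h
      · omega
      · rw [List.pairwise_cons] at hvs
        have := hvs.1 _ h; omega
    have hrest := ih (l.filter (fun p => !decide (p.2 = v)))
      (List.Pairwise.sublist List.filter_sublist hl)
      (List.pairwise_cons.mp hvs).2
      (by
        intro p hp
        rw [List.mem_filter] at hp
        rcases List.mem_cons.mp (hmem p hp.1) with h | h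
        · exact absurd h (by simpa using hp.2)
        · exact h)
    have hcong : vs'.flatMap (fun w => (l.filter (fun p => !decide (p.2 = v))).filter
        (fun p => decide (p.2 = w)))
        = vs'.flatMap (fun w => l.filter (fun p => decide (p.2 = w))) := by
      apply List.flatMap_congr  -- placeholder; replaced below if name differs
      intro w hw
      rw [List.filter_filter]
      congr 1
      funext p
      rw [List.pairwise_cons] at hvs
      have hw' : w < v := hvs.1 _ hw
      by_cases hpw : p.2 = w <;> simp [hpw] <;> omega
    calc l = l.filter (fun p => decide (p.2 = v)) ++ l.filter (fun p => !decide (p.2 = v)) :=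
            pv_split_top v l hl hb
      _ = l.filter (fun p => decide (p.2 = v))
            ++ vs'.flatMap (fun w => l.filter (fun p => decide (p.2 = w))) := by
            rw [← hcong, ← hrest]

-- projecting the line out of the per-score filter of the (line, score) pairs
theorem pv_proj (ls : List String) (f : String → Int) (v : Int) :
    ((ls.map (fun l => (l, f l))).filter (fun p => decide (p.2 = v))).map (fun p => p.1)
      = ls.filter (fun l => decide (f l = v)) := by
  induction ls with
  | nil => rfl
  | cons x t ih =>
    simp only [List.map_cons, List.filter_cons]
    by_cases h : f x = v
    · simp [h, ih]
    · simp [h, ih]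

-- the heart: A's sorted-filtered-projected list equals B's bucket read-out
theorem pv_core (content query : String) :
    ((PySem.List.sorted ((pvLines content).map (fun line => (line, pvScoreLine line query)))
        (fun item => item.2) true).filter (fun p => decide (0 < p.2))).map (fun p => p.1)
    = (PySem.List.pyRange
        (((pvLines content).foldl (pvStep query) (PySem.Dict.empty, 0)).2) 0 (-1)).foldl
        (fun acc s => acc ++ (((pvLines content).foldl (pvStep query) (PySem.Dict.empty, 0)).1).getD s []) [] := by
  set ls := pvLines content with hls
  set st := ls.foldl (pvStep query) (PySem.Dict.empty, 0) with hst
  have hb0 : (0:Int) ≤ st.2 := by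
    have h := pv_best_mono query ls ((PySem.Dict.empty, 0) : PySem.Dict Int (List String) × Int)
    rw [hst]; exact h
  rw [pv_pyRange_desc st.2 hb0, PySem.List.foldl_append_eq_flatMap, List.nil_append]
  set desc := (List.range st.2.toNat).map (fun k : Nat => st.2 - (k : Int)) with hdesc
  set ps := ls.map (fun line => (line, pvScoreLine line query)) with hps
  set L := (PySem.List.sorted ps (fun item => item.2) true).filter (fun p => decide (0 < p.2)) with hL
  have hLpair : L.Pairwise (fun a b => b.2 ≤ a.2) :=
    List.Pairwise.sublist List.filter_sublist (PySem.List.sorted_pairwise_rev ps (fun item => item.2))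
  have hdp : desc.Pairwise (fun a b => b < a) := by
    rw [hdesc]
    refine List.pairwise_map.mpr ?_
    exact (List.pairwise_lt_range).imp (by intro a b h; omega)
  have hmem : ∀ p ∈ L, p.2 ∈ desc := by
    intro p hp
    rw [hL, List.mem_filter] at hp
    have hpos : 0 < p.2 := by simpa using hp.2
    have hmem' : p ∈ ps := (PySem.List.mem_sorted ps _ true p).mp hp.1
    rw [hps, List.mem_map] at hmem'
    obtain ⟨l, hl, rfl⟩ := hmem'
    have hub : pvScoreLine l query ≤ st.2 := by
      have h := pv_best_bound query ls ((PySem.Dict.empty, 0) : PySem.Dict Int (List String) × Int)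
        l hl (by simpa using hpos)
      rw [hst]; exact h
    rw [hdesc, List.mem_map]
    refine ⟨(st.2 - pvScoreLine l query).toNat, ?_, ?_⟩
    · rw [List.mem_range]
      simp at hpos
      omega
    · simp at hpos ⊢
      omega
  have hsplit := pv_bucket_decomp desc L hLpair hdp hmem
  calc L.map (fun p => p.1)
      = (desc.flatMap (fun v => L.filter (fun p => decide (p.2 = v)))).map (fun p => p.1) := by
        rw [← hsplit]
    _ = desc.flatMap (fun v => (L.filter (fun p => decide (p.2 = v))).map (fun p => p.1)) := by
        rw [List.map_flatMap]
    _ = desc.flatMap (fun s => st.1.getD s []) := by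
        apply List.flatMap_congr
        intro v hv
        have hv1 : 1 ≤ v ∧ v ≤ st.2 := pv_mem_desc st.2 v (by rwa [hdesc] at hv)
        rw [hL, List.filter_filter]
        have hfe : (PySem.List.sorted ps (fun item => item.2) true).filter
            (fun a => decide (a.2 = v) && decide (0 < a.2))
            = (PySem.List.sorted ps (fun item => item.2) true).filter (fun a => decide (a.2 = v)) := by
          apply List.filter_congr
          intro a _
          by_cases ha : a.2 = v
          · simp [ha]; omega
          · simp [ha]
        rw [hfe, pv_sorted_stable v ps, hps]
        rw [pv_proj ls (fun l => pvScoreLine l query) v]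
        rw [hst, pv_bucket query ls ((PySem.Dict.empty, 0) : PySem.Dict Int (List String) × Int) v
          (by omega)]
        simp [PySem.Dict.getD_empty]

theorem pv_main (content query : String) (limit : Int) :
    scored_excerpt_py content query limit = scored_excerpt_py_alt content query limit := by
  unfold scored_excerpt_py scored_excerpt_py_alt
  simp only []
  rw [pv_fold_skip]
  rw [show ((PySem.Str.splitlines content).map PySem.Str.strip).filter
      (fun l => decide (PySem.Str.len l ≠ 0)) = pvLines content from rfl]
  rw [← pv_core content query]

-- ===== VERDICT (by name: the statement is the Claim_ definition above) =====
theorem scored_excerpt_py_spec : Claim_equal_scored_excerpt_py := by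
  intro content query limit _
  unfold Spec_scored_excerpt_py
  exact pv_main content query limit
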